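-- pv_equiv track=rewrite | github.com/ionut94/motif_detection_polyphonic | src/complexity_analysis.py | generate_motifs
-- ===== SOURCE A (Python) =====
-- from typing import List, Dict, Tuple, Callable, Optional, Set
--
-- def generate_motifs(start_size: int, end_size: int, step: int = 1) -> Dict[int, List[int]]:
--     """Generate motifs of different sizes for testing complexity."""
--     motifs = {}
--     # Use C major scale pattern for predictable motifs
--     scale = [60, 62, 64, 65, 67, 69, 71, 72]
--
--     for size in range(start_size, end_size + 1, step):
--         # Generate a motif of specified size by repeating the scale pattern
--         motif = []
--         for i in range(size):
--             motif.append(scale[i % len(scale)])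
--         motifs[size] = motif
--
--     return motifs
-- ===== SOURCE B (Python) =====
-- def generate_motifs(start_size: int, end_size: int, step: int = 1):
--     """Generate motifs of different sizes for testing complexity.
--
--     Build the repeated-scale pattern ONCE up to the largest needed size,
--     then each motif is just a prefix (slice) of that shared list."""
--     motifs = {}
--     scale = [60, 62, 64, 65, 67, 69, 71, 72]
--     sizes = range(start_size, end_size + 1, step)
--     if sizes:
--         m = max(max(sizes), 0)
--         reps = (m + len(scale) - 1) // len(scale)
--         full = scale * reps
--         for size in sizes:
--             motifs[size] = full[:max(0, size)]
--     return motifs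
-- ===== Notes on version B (the rewrite author's own statement) =====
-- stated objective: alternative
-- what changed: Instead of regenerating each motif element-by-element with an inner loop per size, B builds the repeated scale pattern once up to the maximum requested size and assigns each motif as a prefix slice of that shared list.
import Mathlib
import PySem

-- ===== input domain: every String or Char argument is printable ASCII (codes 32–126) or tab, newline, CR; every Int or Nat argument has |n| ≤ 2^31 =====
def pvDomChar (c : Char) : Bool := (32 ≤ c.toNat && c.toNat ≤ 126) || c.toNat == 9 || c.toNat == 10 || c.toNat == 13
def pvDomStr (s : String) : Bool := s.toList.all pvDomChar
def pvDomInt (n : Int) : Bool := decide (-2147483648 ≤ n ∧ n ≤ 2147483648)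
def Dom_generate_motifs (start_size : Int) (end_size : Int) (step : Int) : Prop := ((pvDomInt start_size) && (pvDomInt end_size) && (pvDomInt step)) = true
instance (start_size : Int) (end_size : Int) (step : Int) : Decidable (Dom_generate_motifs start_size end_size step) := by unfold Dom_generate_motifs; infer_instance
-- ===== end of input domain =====

-- B builds the repeated scale pattern once and takes prefix slices, instead of A's per-size inner append loop; same return value, proved equal.

-- ===== PORT A =====
-- for size in range(start, end+1, step): inner loop builds motif by appending scale[i % 8]; motifs[size] = motif
def generate_motifs (start_size : Int) (end_size : Int) (step : Int) : List (Int × List Int) :=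
  let scale : List Int := [60, 62, 64, 65, 67, 69, 71, 72]
  let motifs :=
    (PySem.List.pyRange start_size (end_size + 1) step).foldl
      (fun (d : PySem.Dict Int (List Int)) size =>
        let motif :=
          (PySem.List.pyRange 0 size 1).foldl
            (fun (m : List Int) i =>
              -- scale[i % len(scale)]: i % 8 is always in range, so pyGetD is exact here
              m ++ [PySem.List.pyGetD scale (PySem.Int.mod i 8) 0]) []
        d.insert size motif)
      PySem.Dict.empty
  motifs.items

-- ===== PORT B =====
def generate_motifs_alt (start_size : Int) (end_size : Int) (step : Int) : List (Int × List Int) :=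
  let scale : List Int := [60, 62, 64, 65, 67, 69, 71, 72]
  let sizes := PySem.List.pyRange start_size (end_size + 1) step
  match PySem.List.max? sizes (fun x => x) with
  | none => (PySem.Dict.empty (κ := Int) (ν := List Int)).items
  | some mx =>
    let m := max mx 0
    let reps := PySem.Int.floordiv (m + 8 - 1) 8
    let full := List.flatten (List.replicate reps.toNat scale)   -- scale * reps
    let motifs :=
      sizes.foldl
        (fun (d : PySem.Dict Int (List Int)) size =>
          -- full[:max(0, size)] with a nonnegative stop is List.take
          d.insert size (full.take (max 0 size).toNat))
        PySem.Dict.empty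
    motifs.items

-- ===== PRECONDITION & SPEC =====
-- Pre_ excludes only step = 0, on which Python's range raises ValueError in both A and B.
def Pre_generate_motifs (start_size : Int) (end_size : Int) (step : Int) : Prop := step ≠ 0
instance (start_size : Int) (end_size : Int) (step : Int) : Decidable (Pre_generate_motifs start_size end_size step) := by unfold Pre_generate_motifs; infer_instance
def pvWitness_generate_motifs : Int × Int × Int := (1, 5, 1)

def Spec_generate_motifs (start_size : Int) (end_size : Int) (step : Int) (out : List (Int × List Int)) : Prop := out = generate_motifs_alt start_size end_size step
instance (start_size : Int) (end_size : Int) (step : Int) (out : List (Int × List Int)) : Decidable (Spec_generate_motifs start_size end_size step out) := by unfold Spec_generate_motifs; infer_instance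

-- ===== CLAIM (what is proved, stated in full; the proofs are below) =====
def Claim_equal_generate_motifs : Prop := ∀ (start_size : Int) (end_size : Int) (step : Int), Dom_generate_motifs start_size end_size step → Pre_generate_motifs start_size end_size step → Spec_generate_motifs start_size end_size step (generate_motifs start_size end_size step)

-- ===== LEMMAS AND PROOFS =====

theorem pv_foldl_append_map {α β : Type} (f : α → β) (l : List α) (init : List β) :
    l.foldl (fun m x => m ++ [f x]) init = init ++ l.map f := by
  induction l generalizing init with
  | nil => simp
  | cons x t ih => simp [List.foldl, ih]

def pvScale : List Int := [60, 62, 64, 65, 67, 69, 71, 72]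

def pvPat (n : Nat) : List Int := (List.range n).map (fun k => pvScale.getD (k % 8) 0)

theorem pv_flatten_replicate (r : Nat) :
    List.flatten (List.replicate r pvScale) = pvPat (8 * r) := by
  induction r with
  | zero => simp [pvPat]
  | succ r ih =>
    have h8 : 8 * (r + 1) = 8 * r + 8 := by ring
    rw [List.replicate_succ', List.flatten_append, ih, h8]
    simp only [pvPat]
    rw [List.range_add, List.map_append]
    congr 1
    have h2 : ((List.range 8).map (fun x => 8 * r + x)).map (fun k => pvScale.getD (k % 8) 0)
        = (List.range 8).map (fun j => pvScale.getD (j % 8) 0) := by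
      rw [List.map_map]
      apply List.map_congr_left
      intro j hj
      simp only [Function.comp_apply]
      congr 1
      omega
    rw [h2]
    decide

theorem pv_take_pat (n N : Nat) (h : n ≤ N) : (pvPat N).take n = pvPat n := by
  unfold pvPat
  have hmin : min n N = n := by omega
  rw [← List.map_take, List.take_range, hmin]

-- A's inner loop computes pvPat size.toNat
theorem pv_inner_eq (size : Int) :
    (PySem.List.pyRange 0 size 1).foldl
      (fun (m : List Int) i => m ++ [PySem.List.pyGetD pvScale (PySem.Int.mod i 8) 0]) []
    = pvPat size.toNat := by
  rw [pv_foldl_append_map, PySem.List.pyRange_one]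
  simp only [List.nil_append, List.map_map, pvPat, Int.sub_zero]
  apply List.map_congr_left
  intro k _
  simp only [Function.comp]
  have h0 : (0 : Int) + (k : Int) = (k : Int) := by ring
  rw [h0, PySem.Int.mod_eq_emod_of_pos (by norm_num)]
  have : ((k : Int) % 8) = ((k % 8 : Nat) : Int) := by push_cast; ring
  rw [this, PySem.List.pyGetD_natCast]

-- 8 * reps ≥ m for reps = (m+7) // 8, m ≥ 0
theorem pv_reps_ge (m : Int) (hm : 0 ≤ m) :
    m.toNat ≤ 8 * (PySem.Int.floordiv (m + 8 - 1) 8).toNat := by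
  rw [PySem.Int.floordiv_eq_ediv_of_pos (by norm_num)]
  have h := Int.ediv_add_emod (m + 7) 8
  have h1 : 0 ≤ (m + 7) % 8 := Int.emod_nonneg _ (by norm_num)
  have h2 : (m + 7) % 8 < 8 := Int.emod_lt_of_pos _ (by norm_num)
  have h3 : 0 ≤ (m + 7) / 8 := Int.ediv_nonneg (by omega) (by norm_num)
  omega

-- ===== VERDICT (by name: the statement is the Claim_ definition above) =====
theorem generate_motifs_spec : Claim_equal_generate_motifs := by
  intro start_size end_size step _ _
  unfold Spec_generate_motifs generate_motifs generate_motifs_alt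
  simp only []
  set sizes := PySem.List.pyRange start_size (end_size + 1) step with hsizes
  cases hmx : PySem.List.max? sizes (fun x => x) with
  | none =>
    have : sizes = [] := (PySem.List.max?_eq_none_iff sizes (fun x => x)).mp hmx
    rw [this]
    rfl
  | some mx =>
    have hmax : ∀ y ∈ sizes, y ≤ mx := by
      intro y hy
      exact PySem.List.max?_isMax hmx y hy
    simp only []
    congr 1
    apply PySem.List.foldl_congr_mem
    intro d size hmem
    congr 1
    have hle : size ≤ max mx 0 := le_trans (hmax size hmem) (le_max_left _ _)
    have hN : size.toNat ≤ 8 * (PySem.Int.floordiv (max mx 0 + 8 - 1) 8).toNat := by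
      have := pv_reps_ge (max mx 0) (le_max_right _ _)
      omega
    have hmaxsz : (max 0 size).toNat = size.toNat := by omega
    rw [hmaxsz]
    have hscale : ([60, 62, 64, 65, 67, 69, 71, 72] : List Int) = pvScale := rfl
    rw [hscale, pv_inner_eq, pv_flatten_replicate, pv_take_pat _ _ hN]
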